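-- pv_equiv track=rewrite | github.com/sarkozyfan/bidking-bot | manual_bidking_advisor.py | enumerate_green_white_splits
-- ===== SOURCE A (Python) =====
-- from typing import Dict, Iterable, List, Optional, Tuple
--
-- def as_non_neg_int(value: object) -> Optional[int]:
--     if value is None or value == "":
--         return None
--     if isinstance(value, bool):
--         raise ValueError("布尔值不能作为整数输入")
--     number = int(value)
--     if number < 0:
--         raise ValueError("数字必须是非负整数")
--     return number
--
-- def enumerate_green_white_splits(data: dict, wg_total: int) -> List[Tuple[int, int]]:
--     exact_green = as_non_neg_int(data.get("count_green"))
--     exact_white = as_non_neg_int(data.get("count_white"))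
--     min_green = as_non_neg_int(data.get("min_count_green")) or 0
--     min_white = as_non_neg_int(data.get("min_count_white")) or 0
--
--     splits: List[Tuple[int, int]] = []
--     if exact_green is not None and exact_white is not None:
--         if exact_green + exact_white == wg_total and exact_green >= min_green and exact_white >= min_white:
--             splits.append((exact_green, exact_white))
--         return splits
--
--     if exact_green is not None:
--         white = wg_total - exact_green
--         if white >= min_white and white >= 0 and exact_green >= min_green:
--             splits.append((exact_green, white))
--         return splits
--
--     if exact_white is not None:
--         green = wg_total - exact_white
--         if green >= min_green and green >= 0 and exact_white >= min_white:
--             splits.append((green, exact_white))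
--         return splits
--
--     for green in range(min_green, wg_total - min_white + 1):
--         white = wg_total - green
--         if white < min_white:
--             continue
--         splits.append((green, white))
--     return splits
-- ===== SOURCE B (Python) =====
-- from typing import List, Optional, Tuple
--
--
-- def as_non_neg_int(value: object) -> Optional[int]:
--     if value is None or value == "":
--         return None
--     if isinstance(value, bool):
--         raise ValueError("布尔值不能作为整数输入")
--     number = int(value)
--     if number < 0:
--         raise ValueError("数字必须是非负整数")
--     return number
--
--
-- def _narrow(p, g):
--     return (max(p[0], g), min(p[1], g))
--
--
-- def enumerate_green_white_splits(data: dict, wg_total: int) -> List[Tuple[int, int]]: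
--     exact_green = as_non_neg_int(data.get("count_green"))
--     exact_white = as_non_neg_int(data.get("count_white"))
--     min_green = as_non_neg_int(data.get("min_count_green")) or 0
--     min_white = as_non_neg_int(data.get("min_count_white")) or 0
--
--     # One green interval: every exact constraint narrows (lo, hi).
--     p = (min_green, wg_total - min_white)
--     if exact_green is not None:
--         p = _narrow(p, exact_green)
--     if exact_white is not None:
--         p = _narrow(p, wg_total - exact_white)
--     return [(green, wg_total - green) for green in range(p[0], p[1] + 1)]
-- ===== Notes on version B (the rewrite author's own statement) =====
-- stated objective: simpler
-- what changed: Replaces A's four separate branch computations (both-exact, exact-green, exact-white, enumeration loop with an inner skip test) by one unified bounds computation: each exact constraint intersects a single green interval [lo, hi], and one comprehension over that interval produces the result.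
import Mathlib
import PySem

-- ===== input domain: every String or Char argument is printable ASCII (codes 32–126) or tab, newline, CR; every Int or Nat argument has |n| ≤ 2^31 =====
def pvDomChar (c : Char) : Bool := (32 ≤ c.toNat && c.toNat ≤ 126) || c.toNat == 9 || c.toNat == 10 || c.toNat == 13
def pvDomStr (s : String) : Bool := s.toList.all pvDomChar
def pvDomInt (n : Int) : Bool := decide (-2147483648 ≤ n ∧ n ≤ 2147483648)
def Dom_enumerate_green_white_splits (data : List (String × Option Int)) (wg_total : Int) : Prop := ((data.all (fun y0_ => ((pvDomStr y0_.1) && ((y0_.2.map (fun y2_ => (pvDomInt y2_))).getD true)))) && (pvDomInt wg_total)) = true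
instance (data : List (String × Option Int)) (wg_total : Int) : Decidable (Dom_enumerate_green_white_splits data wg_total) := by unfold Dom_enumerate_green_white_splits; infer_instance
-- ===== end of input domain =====

-- B replaces A's four separate branches by one green-interval [lo, hi] intersection plus a
-- single comprehension over it (objective: simpler).

-- ===== PORT A =====
-- shared module helper as_non_neg_int: its argument here is always an Option Int (the dict's
-- values), so `value == ""` is always False and the bool check never fires; `none` = Python's
-- ValueError on a negative input.
def pvAsNonNeg? (v : Option Int) : Option (Option Int) :=
  match v with
  | none => some none
  | some n => if n < 0 then none else some (some n)

def enumerate_green_white_splits (data : List (String × Option Int)) (wg_total : Int) : List (Int × Int) :=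
  let d := PySem.Dict.ofList data
  match pvAsNonNeg? (d.getD "count_green" none), pvAsNonNeg? (d.getD "count_white" none),
        pvAsNonNeg? (d.getD "min_count_green" none), pvAsNonNeg? (d.getD "min_count_white" none) with
  | some exact_green, some exact_white, some mgo, some mwo =>
    let min_green := mgo.getD 0    -- `... or 0`
    let min_white := mwo.getD 0
    match exact_green, exact_white with
    | some g, some w =>
      if g + w = wg_total ∧ g ≥ min_green ∧ w ≥ min_white then [(g, w)] else []
    | some g, none =>
      let white := wg_total - g
      if white ≥ min_white ∧ white ≥ 0 ∧ g ≥ min_green then [(g, white)] else []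
    | none, some w =>
      let green := wg_total - w
      if green ≥ min_green ∧ green ≥ 0 ∧ w ≥ min_white then [(green, w)] else []
    | none, none =>
      (PySem.List.pyRange min_green (wg_total - min_white + 1) 1).foldl
        (fun splits green =>
          let white := wg_total - green
          if white < min_white then splits else splits ++ [(green, white)]) []
  | _, _, _, _ => []   -- as_non_neg_int raised; excluded by Pre_

-- ===== PORT B =====
-- B's own copy of the module helper as_non_neg_int (same reading as pvAsNonNeg? above)
def pvAsNonNegB? (v : Option Int) : Option (Option Int) :=
  match v with
  | none => some none
  | some n => if n < 0 then none else some (some n)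

def pvNarrow (p : Int × Int) (g : Int) : Int × Int := (max p.1 g, min p.2 g)

def enumerate_green_white_splits_alt (data : List (String × Option Int)) (wg_total : Int) : List (Int × Int) :=
  let d := PySem.Dict.ofList data
  match pvAsNonNegB? (d.getD "count_green" none) with
  | none => []   -- as_non_neg_int raised; excluded by Pre_
  | some exact_green =>
  match pvAsNonNegB? (d.getD "count_white" none) with
  | none => []
  | some exact_white =>
  match pvAsNonNegB? (d.getD "min_count_green" none) with
  | none => []
  | some mgo =>
  match pvAsNonNegB? (d.getD "min_count_white" none) with
  | none => []
  | some mwo =>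
    let min_green := mgo.getD 0
    let min_white := mwo.getD 0
    let p0 : Int × Int := (min_green, wg_total - min_white)
    let p1 : Int × Int := (exact_green.map (pvNarrow p0)).getD p0
    let p2 : Int × Int := (exact_white.map (fun w => pvNarrow p1 (wg_total - w))).getD p1
    (PySem.List.pyRange p2.1 (p2.2 + 1) 1).map (fun green => (green, wg_total - green))

-- ===== PRECONDITION & SPEC =====
-- Pre_ excludes exactly the inputs where A's helper as_non_neg_int raises ValueError:
-- a negative integer stored under any of the four count keys.
def Pre_enumerate_green_white_splits (data : List (String × Option Int)) (wg_total : Int) : Prop :=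
  0 ≤ (((PySem.Dict.ofList data).getD "count_green" none).getD 0) ∧
  0 ≤ (((PySem.Dict.ofList data).getD "count_white" none).getD 0) ∧
  0 ≤ (((PySem.Dict.ofList data).getD "min_count_green" none).getD 0) ∧
  0 ≤ (((PySem.Dict.ofList data).getD "min_count_white" none).getD 0)
instance (data : List (String × Option Int)) (wg_total : Int) : Decidable (Pre_enumerate_green_white_splits data wg_total) := by unfold Pre_enumerate_green_white_splits; infer_instance

def pvWitness_enumerate_green_white_splits : (List (String × Option Int)) × Int :=
  ([("min_count_green", some 1), ("min_count_white", some 1)], 4)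

def Spec_enumerate_green_white_splits (data : List (String × Option Int)) (wg_total : Int) (out : List (Int × Int)) : Prop := out = enumerate_green_white_splits_alt data wg_total
instance (data : List (String × Option Int)) (wg_total : Int) (out : List (Int × Int)) : Decidable (Spec_enumerate_green_white_splits data wg_total out) := by unfold Spec_enumerate_green_white_splits; infer_instance

-- ===== CLAIM (what is proved, stated in full; the proofs are below) =====
def Claim_equal_enumerate_green_white_splits : Prop := ∀ (data : List (String × Option Int)) (wg_total : Int), Dom_enumerate_green_white_splits data wg_total → Pre_enumerate_green_white_splits data wg_total → Spec_enumerate_green_white_splits data wg_total (enumerate_green_white_splits data wg_total)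

-- ===== LEMMAS AND PROOFS =====

lemma pvAsNonNeg?_of_nonneg (v : Option Int) (h : 0 ≤ v.getD 0) : pvAsNonNeg? v = some v := by
  cases v with
  | none => rfl
  | some n => simp only [Option.getD_some] at h; simp [pvAsNonNeg?, not_lt.mpr h]

lemma pvAsNonNegB?_of_nonneg (v : Option Int) (h : 0 ≤ v.getD 0) : pvAsNonNegB? v = some v := by
  cases v with
  | none => rfl
  | some n => simp only [Option.getD_some] at h; simp [pvAsNonNegB?, not_lt.mpr h]

lemma pvRange_empty (a b : Int) (h : b ≤ a) : PySem.List.pyRange a b 1 = [] := by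
  simp [PySem.List.pyRange, h]

lemma pvRange_single (a : Int) : PySem.List.pyRange a (a + 1) 1 = [a] := by
  rw [PySem.List.pyRange_one_cons (by omega)]
  simp [PySem.List.pyRange]

-- core equivalence of the two branch structures, for nonnegative minima
lemma pvCore (t mg mw : Int) (eg ew : Option Int) (hmg : 0 ≤ mg) (hmw : 0 ≤ mw) :
    (match eg, ew with
     | some g, some w =>
       if g + w = t ∧ g ≥ mg ∧ w ≥ mw then [(g, w)] else []
     | some g, none =>
       let white := t - g
       if white ≥ mw ∧ white ≥ 0 ∧ g ≥ mg then [(g, white)] else []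
     | none, some w =>
       let green := t - w
       if green ≥ mg ∧ green ≥ 0 ∧ w ≥ mw then [(green, w)] else []
     | none, none =>
       (PySem.List.pyRange mg (t - mw + 1) 1).foldl
         (fun splits green =>
           let white := t - green
           if white < mw then splits else splits ++ [(green, white)]) ([] : List (Int × Int))) =
    (let p0 : Int × Int := (mg, t - mw)
     let p1 : Int × Int := (eg.map (pvNarrow p0)).getD p0
     let p2 : Int × Int := (ew.map (fun w => pvNarrow p1 (t - w))).getD p1
     (PySem.List.pyRange p2.1 (p2.2 + 1) 1).map (fun green => (green, t - green))) := by
  cases eg with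
  | some g =>
    cases ew with
    | some w =>
      dsimp only [Option.map_some, Option.map_none, Option.getD_some, Option.getD_none, pvNarrow]
      by_cases h : g + w = t ∧ g ≥ mg ∧ w ≥ mw
      · obtain ⟨h1, h2, h3⟩ := h
        rw [if_pos (show g + w = t ∧ g ≥ mg ∧ w ≥ mw from ⟨h1, h2, h3⟩)]
        have e1 : max (max mg g) (t - w) = g := by omega
        have e2 : min (min (t - mw) g) (t - w) = g := by omega
        simp only [e1, e2, pvRange_single, List.map_cons, List.map_nil]
        have : t - g = w := by omega
        simp [this]
      · simp only [if_neg h]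
        have : min (min (t - mw) g) (t - w) + 1 ≤ max (max mg g) (t - w) := by omega
        rw [pvRange_empty _ _ this]
        simp
    | none =>
      dsimp only [Option.map_some, Option.map_none, Option.getD_some, Option.getD_none, pvNarrow]
      by_cases h : t - g ≥ mw ∧ t - g ≥ 0 ∧ g ≥ mg
      · obtain ⟨h1, h2, h3⟩ := h
        have e1 : max mg g = g := by omega
        have e2 : min (t - mw) g = g := by omega
        rw [if_pos (show t - g ≥ mw ∧ t - g ≥ 0 ∧ g ≥ mg from ⟨h1, h2, h3⟩)]
        simp only [e1, e2, pvRange_single, List.map_cons, List.map_nil]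
      · simp only [if_neg h]
        have : min (t - mw) g + 1 ≤ max mg g := by omega
        rw [pvRange_empty _ _ this]
        simp
  | none =>
    cases ew with
    | some w =>
      dsimp only [Option.map_some, Option.map_none, Option.getD_some, Option.getD_none, pvNarrow]
      by_cases h : t - w ≥ mg ∧ t - w ≥ 0 ∧ w ≥ mw
      · obtain ⟨h1, h2, h3⟩ := h
        have e1 : max mg (t - w) = t - w := by omega
        have e2 : min (t - mw) (t - w) = t - w := by omega
        rw [if_pos (show t - w ≥ mg ∧ t - w ≥ 0 ∧ w ≥ mw from ⟨h1, h2, h3⟩)]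
        simp only [e1, e2, pvRange_single, List.map_cons, List.map_nil]
        have : t - (t - w) = w := by omega
        simp [this]
      · simp only [if_neg h]
        have : min (t - mw) (t - w) + 1 ≤ max mg (t - w) := by omega
        rw [pvRange_empty _ _ this]
        simp
    | none =>
      dsimp only [Option.map_some, Option.map_none, Option.getD_some, Option.getD_none, pvNarrow]
      have step : ∀ (acc : List (Int × Int)), ∀ x ∈ PySem.List.pyRange mg (t - mw + 1) 1,
          (fun splits green =>
            let white := t - green
            if white < mw then splits else splits ++ [(green, white)]) acc x =
          (fun splits green => splits ++ [(green, t - green)]) acc x := by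
        intro acc x hx
        rw [PySem.List.mem_pyRange_one] at hx
        simp only
        rw [if_neg (by omega)]
      rw [PySem.List.foldl_congr_mem _ _ _ _ step,
          PySem.List.foldl_append_singleton_eq_map]
      simp

-- ===== VERDICT (by name: the statement is the Claim_ definition above) =====
theorem enumerate_green_white_splits_spec : Claim_equal_enumerate_green_white_splits := by
  intro data wg_total _ hpre
  obtain ⟨h1, h2, h3, h4⟩ := hpre
  unfold Spec_enumerate_green_white_splits
  unfold enumerate_green_white_splits enumerate_green_white_splits_alt
  simp only [pvAsNonNeg?_of_nonneg _ h1, pvAsNonNeg?_of_nonneg _ h2,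
             pvAsNonNeg?_of_nonneg _ h3, pvAsNonNeg?_of_nonneg _ h4,
             pvAsNonNegB?_of_nonneg _ h1, pvAsNonNegB?_of_nonneg _ h2,
             pvAsNonNegB?_of_nonneg _ h3, pvAsNonNegB?_of_nonneg _ h4]
  exact pvCore wg_total _ _ _ _ h3 h4
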